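-- pv_equiv track=rewrite | github.com/kircherlab/MPRAOligoDesign | workflow/scripts/tiling/centerTiling.py | tileRegion
-- ===== SOURCE A (Python) =====
-- def tileRegion(start, end, oligo_length, min_overlap, isLeft=True):
--
--     div = ((end - start) - min_overlap) // (oligo_length-min_overlap)
--     if ((end - start) - min_overlap) % (oligo_length-min_overlap) != 0:
--         div += 1
--
--     # just center, left, right
--     if div == 2:
--         if isLeft:
--             yield(start, start+oligo_length)
--         else:
--             yield(end-oligo_length, end)
--
--     else:
--         extension = (((oligo_length-min_overlap) - ((end - start) - min_overlap) %
--                      (oligo_length-min_overlap))) % (oligo_length-min_overlap) // (div-1)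
--         first = ((oligo_length-min_overlap) - ((end - start) - min_overlap) % (oligo_length-min_overlap)) % (div-1)
--         for i in range(div):
--             tile_left = start
--             tile_right = start + oligo_length
--             # don't get center
--             if not ((i == div-1 and isLeft) or (i == 0 and not isLeft)):
--                 yield(tile_left, tile_right)
--             if (i == div-2 and isLeft) or (i == 0 and not isLeft):
--                 start = tile_right-(extension+min_overlap+first)
--             else:
--                 start = tile_right-(extension+min_overlap)
-- ===== SOURCE B (Python) =====
-- def tileRegion(start, end, oligo_length, min_overlap, isLeft=True):
--     span = (end - start) - min_overlap
--     unit = oligo_length - min_overlap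
--     div = -(-span // unit)  # ceiling division
--
--     # just center, left, right
--     if div == 2:
--         yield (start, start + oligo_length) if isLeft else (end - oligo_length, end)
--         return
--
--     extension = (unit - span % unit) % unit // (div - 1)
--     first = (unit - span % unit) % (div - 1)
--     step = oligo_length - extension - min_overlap
--     skip = div - 1 if isLeft else 0   # suppressed center tile
--     cut = div - 1 if isLeft else 1    # indices past the one-time -first correction
--     for i in range(div):
--         if i != skip:
--             left = start + i * step - (first if i >= cut else 0)
--             yield (left, left + oligo_length)
-- ===== Notes on version B (the rewrite author's own statement) =====
-- stated objective: alternative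
-- what changed: B computes each tile's left edge by a direct closed form from its index (start + i*step minus a one-time offset past the special index) instead of threading A's mutated running start through the loop, and uses a single ceiling division instead of floor-then-bump.
import Mathlib
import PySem

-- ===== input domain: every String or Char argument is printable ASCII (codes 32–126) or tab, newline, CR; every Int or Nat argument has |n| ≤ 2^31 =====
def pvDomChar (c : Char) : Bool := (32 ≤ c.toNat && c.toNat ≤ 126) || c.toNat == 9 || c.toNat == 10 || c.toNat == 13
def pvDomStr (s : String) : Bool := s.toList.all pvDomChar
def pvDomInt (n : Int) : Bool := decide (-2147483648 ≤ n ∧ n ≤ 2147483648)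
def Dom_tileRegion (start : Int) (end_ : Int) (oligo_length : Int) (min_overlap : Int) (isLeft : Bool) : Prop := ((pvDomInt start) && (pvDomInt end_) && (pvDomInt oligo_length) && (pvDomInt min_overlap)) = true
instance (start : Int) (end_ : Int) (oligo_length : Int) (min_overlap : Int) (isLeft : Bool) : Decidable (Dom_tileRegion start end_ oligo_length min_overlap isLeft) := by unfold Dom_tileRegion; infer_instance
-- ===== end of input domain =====

-- B replaces A's accumulator-threaded mutation of `start` with a direct per-index
-- closed form for each tile's left edge (objective: alternative decomposition, same cost).

-- ===== PORT A =====
-- literal transliteration of A: the generator's yields are collected into a list;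
-- the running mutation of `start` is the first component of the fold state
-- (the state update and the yield are the two components of one pair).
def tileRegion (start : Int) (end_ : Int) (oligo_length : Int) (min_overlap : Int) (isLeft : Bool) : List (Int × Int) :=
  let div0 := PySem.Int.floordiv ((end_ - start) - min_overlap) (oligo_length - min_overlap)
  let div := if PySem.Int.mod ((end_ - start) - min_overlap) (oligo_length - min_overlap) ≠ 0 then div0 + 1 else div0
  if div = 2 then
    if isLeft then [(start, start + oligo_length)] else [(end_ - oligo_length, end_)]
  else
    let extension := PySem.Int.floordiv
      (PySem.Int.mod ((oligo_length - min_overlap) - PySem.Int.mod ((end_ - start) - min_overlap) (oligo_length - min_overlap)) (oligo_length - min_overlap))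
      (div - 1)
    let first := PySem.Int.mod ((oligo_length - min_overlap) - PySem.Int.mod ((end_ - start) - min_overlap) (oligo_length - min_overlap)) (div - 1)
    ((PySem.List.pyRange 0 div 1).foldl (fun (st : Int × List (Int × Int)) i =>
      ((if (i = div - 2 ∧ isLeft = true) ∨ (i = 0 ∧ isLeft = false)
          then st.1 + oligo_length - (extension + min_overlap + first)
          else st.1 + oligo_length - (extension + min_overlap)),
       (if ¬ ((i = div - 1 ∧ isLeft = true) ∨ (i = 0 ∧ isLeft = false))
          then st.2 ++ [(st.1, st.1 + oligo_length)] else st.2))) (start, [])).2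

-- ===== PORT B =====
-- literal transliteration of Source B: each tile's left edge is computed directly from its index
-- (Source B's local `left` is written out twice).
def tileRegion_alt (start : Int) (end_ : Int) (oligo_length : Int) (min_overlap : Int) (isLeft : Bool) : List (Int × Int) :=
  let span := (end_ - start) - min_overlap
  let unit := oligo_length - min_overlap
  let div := -(PySem.Int.floordiv (-span) unit)
  if div = 2 then
    [if isLeft then (start, start + oligo_length) else (end_ - oligo_length, end_)]
  else
    let extension := PySem.Int.floordiv (PySem.Int.mod (unit - PySem.Int.mod span unit) unit) (div - 1)
    let first := PySem.Int.mod (unit - PySem.Int.mod span unit) (div - 1)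
    let step := oligo_length - extension - min_overlap
    (PySem.List.pyRange 0 div 1).filterMap (fun i =>
      if i ≠ (if isLeft then div - 1 else 0) then
        some (start + i * step - (if i ≥ (if isLeft then div - 1 else 1) then first else 0),
              start + i * step - (if i ≥ (if isLeft then div - 1 else 1) then first else 0) + oligo_length)
      else none)

-- ===== PRECONDITION & SPEC =====
-- Pre_ excludes exactly the inputs where Python A raises ZeroDivisionError:
-- oligo_length = min_overlap, or a ceiling-divided tile count of 1 (then A divides by div-1 = 0).
def Pre_tileRegion (start : Int) (end_ : Int) (oligo_length : Int) (min_overlap : Int) (isLeft : Bool) : Prop :=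
  oligo_length - min_overlap ≠ 0 ∧
  -(PySem.Int.floordiv (-((end_ - start) - min_overlap)) (oligo_length - min_overlap)) ≠ 1
instance (start : Int) (end_ : Int) (oligo_length : Int) (min_overlap : Int) (isLeft : Bool) : Decidable (Pre_tileRegion start end_ oligo_length min_overlap isLeft) := by unfold Pre_tileRegion; infer_instance

def pvWitness_tileRegion : Int × Int × Int × Int × Bool := (0, 100, 30, 10, true)

def Spec_tileRegion (start : Int) (end_ : Int) (oligo_length : Int) (min_overlap : Int) (isLeft : Bool) (out : List (Int × Int)) : Prop := out = tileRegion_alt start end_ oligo_length min_overlap isLeft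
instance (start : Int) (end_ : Int) (oligo_length : Int) (min_overlap : Int) (isLeft : Bool) (out : List (Int × Int)) : Decidable (Spec_tileRegion start end_ oligo_length min_overlap isLeft out) := by unfold Spec_tileRegion; infer_instance

-- ===== CLAIM (what is proved, stated in full; the proofs are below) =====
def Claim_equal_tileRegion : Prop := ∀ (start : Int) (end_ : Int) (oligo_length : Int) (min_overlap : Int) (isLeft : Bool), Dom_tileRegion start end_ oligo_length min_overlap isLeft → Pre_tileRegion start end_ oligo_length min_overlap isLeft → Spec_tileRegion start end_ oligo_length min_overlap isLeft (tileRegion start end_ oligo_length min_overlap isLeft)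

-- ===== LEMMAS AND PROOFS =====

-- ceiling division -((-a)//b) equals A's "floor then bump if remainder" form, any b ≠ 0
theorem pv_ceil_eq (a b : Int) (hb : b ≠ 0) :
    (if PySem.Int.mod a b ≠ 0 then PySem.Int.floordiv a b + 1 else PySem.Int.floordiv a b)
      = -(PySem.Int.floordiv (-a) b) := by
  have h1 := PySem.Int.floordiv_mul_add_mod a b
  have h2 := PySem.Int.floordiv_mul_add_mod (-a) b
  by_cases hm : PySem.Int.mod a b = 0
  · have ha : b ∣ a := (PySem.Int.mod_eq_zero_iff_dvd a b).mp hm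
    have hm' : PySem.Int.mod (-a) b = 0 := (PySem.Int.mod_eq_zero_iff_dvd (-a) b).mpr (dvd_neg.mpr ha)
    have h3 : (PySem.Int.floordiv a b + PySem.Int.floordiv (-a) b) * b = 0 := by
      rw [add_mul]; linarith
    rcases mul_eq_zero.mp h3 with h4 | h4
    · simp only [hm, ne_eq, not_true_eq_false, if_false]; linarith
    · exact absurd h4 hb
  · have ha : ¬ b ∣ a := fun h => hm ((PySem.Int.mod_eq_zero_iff_dvd a b).mpr h)
    have hm' : PySem.Int.mod (-a) b ≠ 0 := fun h =>
      ha (dvd_neg.mp ((PySem.Int.mod_eq_zero_iff_dvd (-a) b).mp h))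
    have hsum : (PySem.Int.floordiv a b + PySem.Int.floordiv (-a) b) * b
        = -(PySem.Int.mod a b + PySem.Int.mod (-a) b) := by
      rw [add_mul]; linarith
    have hs : PySem.Int.floordiv a b + PySem.Int.floordiv (-a) b = -1 := by
      rcases lt_or_gt_of_ne hb with hneg | hpos
      · obtain ⟨hb1, hb2⟩ := PySem.Int.mod_neg_bounds (a := a) hneg
        obtain ⟨hb1', hb2'⟩ := PySem.Int.mod_neg_bounds (a := -a) hneg
        have hlt : 0 < (PySem.Int.floordiv a b + PySem.Int.floordiv (-a) b) * b := by
          rw [hsum]; omega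
        have hgt : (PySem.Int.floordiv a b + PySem.Int.floordiv (-a) b) * b < -2 * b := by
          rw [hsum]; omega
        have hs0 : PySem.Int.floordiv a b + PySem.Int.floordiv (-a) b < 0 := by
          by_contra h; push_neg at h
          nlinarith [mul_le_mul_of_nonpos_right h hneg.le]
        have hs2 : -2 < PySem.Int.floordiv a b + PySem.Int.floordiv (-a) b := by
          by_contra h; push_neg at h
          nlinarith [mul_le_mul_of_nonpos_right h hneg.le]
        omega
      · have hb1 := PySem.Int.mod_nonneg (a := a) hpos
        have hb2 := PySem.Int.mod_lt (a := a) hpos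
        have hb1' := PySem.Int.mod_nonneg (a := -a) hpos
        have hb2' := PySem.Int.mod_lt (a := -a) hpos
        have hlt : (PySem.Int.floordiv a b + PySem.Int.floordiv (-a) b) * b < 0 := by
          rw [hsum]; omega
        have hgt : -2 * b < (PySem.Int.floordiv a b + PySem.Int.floordiv (-a) b) * b := by
          rw [hsum]; omega
        have hs0 : PySem.Int.floordiv a b + PySem.Int.floordiv (-a) b < 0 := by
          by_contra h; push_neg at h
          nlinarith [mul_le_mul_of_nonneg_right h hpos.le]
        have hs2 : -2 < PySem.Int.floordiv a b + PySem.Int.floordiv (-a) b := by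
          by_contra h; push_neg at h
          nlinarith [mul_le_mul_of_nonneg_right h hpos.le]
        omega
    simp only [hm, ne_eq, not_false_eq_true, if_true]
    linarith

-- the loop invariant: from state "left edge of tile k" the fold produces exactly the
-- closed-form tiles for indices k … div-1
theorem pv_loop (oligo_length min_overlap extension first div : Int) (isLeft : Bool)
    (start : Int) :
    ∀ (n : Nat) (k : Int) (acc : List (Int × Int)), 0 ≤ k → div = k + n →
    ((PySem.List.pyRange k div 1).foldl (fun (st : Int × List (Int × Int)) i =>
      ((if (i = div - 2 ∧ isLeft = true) ∨ (i = 0 ∧ isLeft = false)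
          then st.1 + oligo_length - (extension + min_overlap + first)
          else st.1 + oligo_length - (extension + min_overlap)),
       (if ¬ ((i = div - 1 ∧ isLeft = true) ∨ (i = 0 ∧ isLeft = false))
          then st.2 ++ [(st.1, st.1 + oligo_length)] else st.2)))
      (start + k * (oligo_length - extension - min_overlap) -
        (if k ≥ (if isLeft then div - 1 else 1) then first else 0), acc)).2
    = acc ++ (PySem.List.pyRange k div 1).filterMap (fun i =>
        if i ≠ (if isLeft then div - 1 else 0) then
          some (start + i * (oligo_length - extension - min_overlap) -
                  (if i ≥ (if isLeft then div - 1 else 1) then first else 0),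
                start + i * (oligo_length - extension - min_overlap) -
                  (if i ≥ (if isLeft then div - 1 else 1) then first else 0) + oligo_length)
        else none) := by
  intro n
  induction n with
  | zero =>
    intro k acc hk hdiv
    rw [PySem.List.pyRange_one_eq_nil (by omega)]
    simp
  | succ n IH =>
    intro k acc hk hdiv
    have hklt : k < div := by omega
    rw [PySem.List.pyRange_one_cons hklt]
    cases isLeft with
    | true =>
      simp only [List.foldl_cons, List.filterMap_cons, Bool.true_eq_false, eq_self_iff_true,
        and_true, and_false, or_false, false_and, false_or, if_true, if_false, ne_eq,
        ite_true, ite_false] at IH ⊢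
      by_cases hk1 : k = div - 1
      · rw [if_pos (show k ≥ div - 1 by omega)]
        rw [if_neg (show ¬ (k = div - 2) by omega)]
        rw [if_neg (show ¬ ¬ (k = div - 1) from not_not_intro hk1)]
        rw [if_neg (show ¬ ¬ (k = div - 1) from not_not_intro hk1)]
        rw [show start + k * (oligo_length - extension - min_overlap) - first + oligo_length -
              (extension + min_overlap)
            = start + (k + 1) * (oligo_length - extension - min_overlap) -
              (if k + 1 ≥ div - 1 then first else 0) from by
          rw [if_pos (by omega)]; ring]
        rw [IH (k + 1) acc (by omega) (by omega)]
      · by_cases hk2 : k = div - 2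
        · rw [if_neg (show ¬ (k ≥ div - 1) by omega)]
          rw [if_pos hk2]
          rw [if_pos (show ¬ (k = div - 1) from hk1)]
          rw [if_pos (show ¬ (k = div - 1) from hk1)]
          rw [show start + k * (oligo_length - extension - min_overlap) - 0 + oligo_length -
                (extension + min_overlap + first)
              = start + (k + 1) * (oligo_length - extension - min_overlap) -
                (if k + 1 ≥ div - 1 then first else 0) from by
            rw [if_pos (by omega)]; ring]
          rw [IH (k + 1) (acc ++ [(start + k * (oligo_length - extension - min_overlap) - 0,
            start + k * (oligo_length - extension - min_overlap) - 0 + oligo_length)])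
            (by omega) (by omega)]
          simp
        · rw [if_neg (show ¬ (k ≥ div - 1) by omega)]
          rw [if_neg (show ¬ (k = div - 2) from hk2)]
          rw [if_pos (show ¬ (k = div - 1) from hk1)]
          rw [if_pos (show ¬ (k = div - 1) from hk1)]
          rw [show start + k * (oligo_length - extension - min_overlap) - 0 + oligo_length -
                (extension + min_overlap)
              = start + (k + 1) * (oligo_length - extension - min_overlap) -
                (if k + 1 ≥ div - 1 then first else 0) from by
            rw [if_neg (show ¬ (k + 1 ≥ div - 1) by omega)]; ring]
          rw [IH (k + 1) (acc ++ [(start + k * (oligo_length - extension - min_overlap) - 0,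
            start + k * (oligo_length - extension - min_overlap) - 0 + oligo_length)])
            (by omega) (by omega)]
          simp
    | false =>
      simp only [List.foldl_cons, List.filterMap_cons, Bool.false_eq_true, eq_self_iff_true,
        and_true, and_false, or_false, false_and, false_or, if_true, if_false, ne_eq,
        ite_true, ite_false] at IH ⊢
      by_cases hk0 : k = 0
      · rw [if_neg (show ¬ (k ≥ (1 : Int)) by omega)]
        rw [if_pos hk0]
        rw [if_neg (show ¬ ¬ (k = 0) from not_not_intro hk0)]
        rw [if_neg (show ¬ ¬ (k = 0) from not_not_intro hk0)]
        rw [show start + k * (oligo_length - extension - min_overlap) - 0 + oligo_length -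
              (extension + min_overlap + first)
            = start + (k + 1) * (oligo_length - extension - min_overlap) -
              (if k + 1 ≥ (1 : Int) then first else 0) from by
          rw [if_pos (by omega)]; ring]
        rw [IH (k + 1) acc (by omega) (by omega)]
      · rw [if_pos (show k ≥ (1 : Int) by omega)]
        rw [if_neg (show ¬ (k = 0) from hk0)]
        rw [if_pos (show ¬ (k = 0) from hk0)]
        rw [if_pos (show ¬ (k = 0) from hk0)]
        rw [show start + k * (oligo_length - extension - min_overlap) - first + oligo_length -
              (extension + min_overlap)
            = start + (k + 1) * (oligo_length - extension - min_overlap) -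
              (if k + 1 ≥ (1 : Int) then first else 0) from by
          rw [if_pos (by omega)]; ring]
        rw [IH (k + 1) (acc ++ [(start + k * (oligo_length - extension - min_overlap) - first,
          start + k * (oligo_length - extension - min_overlap) - first + oligo_length)])
          (by omega) (by omega)]
        simp

-- ===== VERDICT (by name: the statement is the Claim_ definition above) =====
theorem tileRegion_spec : Claim_equal_tileRegion := by
  unfold Claim_equal_tileRegion
  intro start end_ oligo_length min_overlap isLeft _ hPre
  obtain ⟨hu, hD1⟩ := hPre
  unfold Spec_tileRegion tileRegion tileRegion_alt
  simp only []
  rw [pv_ceil_eq ((end_ - start) - min_overlap) (oligo_length - min_overlap) hu]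
  set D := -(PySem.Int.floordiv (-((end_ - start) - min_overlap)) (oligo_length - min_overlap)) with hD
  by_cases hD2 : D = 2
  · rw [if_pos hD2, if_pos hD2]
    cases isLeft <;> simp
  · rw [if_neg hD2, if_neg hD2]
    by_cases hDpos : 0 < D
    · have hloop := pv_loop oligo_length min_overlap
        (PySem.Int.floordiv (PySem.Int.mod ((oligo_length - min_overlap) -
          PySem.Int.mod ((end_ - start) - min_overlap) (oligo_length - min_overlap))
          (oligo_length - min_overlap)) (D - 1))
        (PySem.Int.mod ((oligo_length - min_overlap) -
          PySem.Int.mod ((end_ - start) - min_overlap) (oligo_length - min_overlap)) (D - 1))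
        D isLeft start D.toNat 0 [] (by omega) (by omega)
      rw [if_neg (show ¬ ((0 : Int) ≥ (if isLeft then D - 1 else 1)) from by
        cases isLeft <;> simp <;> omega)] at hloop
      rw [show start + 0 * (oligo_length -
            PySem.Int.floordiv (PySem.Int.mod ((oligo_length - min_overlap) -
              PySem.Int.mod ((end_ - start) - min_overlap) (oligo_length - min_overlap))
              (oligo_length - min_overlap)) (D - 1) - min_overlap) - 0 = start from by ring] at hloop
      rw [hloop]
      simp
    · rw [PySem.List.pyRange_one_eq_nil (by omega)]
      simp
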